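-- pv_equiv track=rewrite | github.com/codewithEshaYoutube/Advent_of_Code_Competition | Day12/day12_part2.py | generate_orientations
-- ===== SOURCE A (Python) =====
-- def rotate_shape(shape):
--     """Rotate shape 90 degrees clockwise."""
--     return sorted((c, -r) for r, c in shape)
--
-- def normalize(shape):
--     """Shift shape to have min_r=0, min_c=0."""
--     if not shape:
--         return tuple()
--     min_r = min(r for r, _ in shape)
--     min_c = min(c for _, c in shape)
--     return tuple(sorted((r - min_r, c - min_c) for r, c in shape))
--
-- def generate_orientations(shape):
--     """Generate all unique rotations and reflections of a shape."""
--     orientations = set()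
--
--     # Original and rotations
--     current = shape
--     for _ in range(4):
--         orientations.add(normalize(current))
--         current = rotate_shape(current)
--
--     # Reflect and rotations
--     reflected = sorted((r, -c) for r, c in shape)
--     current = reflected
--     for _ in range(4):
--         orientations.add(normalize(current))
--         current = rotate_shape(current)
--
--     return [list(orient) for orient in orientations]
-- ===== SOURCE B (Python) =====
-- # The 8 dihedral symmetries as one flat table of coordinate transforms,
-- # replacing A's two rotate-accumulate loops.
-- TRANSFORMS = [
--     lambda r, c: (r, c),
--     lambda r, c: (c, -r),
--     lambda r, c: (-r, -c),
--     lambda r, c: (-c, r),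
--     lambda r, c: (r, -c),
--     lambda r, c: (-c, -r),
--     lambda r, c: (-r, c),
--     lambda r, c: (c, r),
-- ]
--
-- def normalize(shape):
--     """Shift shape to have min_r=0, min_c=0."""
--     if not shape:
--         return tuple()
--     min_r = min(r for r, _ in shape)
--     min_c = min(c for _, c in shape)
--     return tuple(sorted((r - min_r, c - min_c) for r, c in shape))
--
-- def generate_orientations(shape):
--     """Generate all unique rotations and reflections of a shape."""
--     orientations = set()
--     for t in TRANSFORMS:
--         orientations.add(normalize([t(r, c) for r, c in shape]))
--     return [list(o) for o in orientations]
-- ===== Notes on version B (the rewrite author's own statement) =====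
-- stated objective: simpler
-- what changed: Replaces A's two stateful rotate-and-accumulate loops (iterated sorted 90-degree rotations of a running shape) with a single flat table of the eight dihedral coordinate transforms, each applied directly to the input and normalized; output order is identical because the same normalized tuples enter the set in the same order.
import Mathlib
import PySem

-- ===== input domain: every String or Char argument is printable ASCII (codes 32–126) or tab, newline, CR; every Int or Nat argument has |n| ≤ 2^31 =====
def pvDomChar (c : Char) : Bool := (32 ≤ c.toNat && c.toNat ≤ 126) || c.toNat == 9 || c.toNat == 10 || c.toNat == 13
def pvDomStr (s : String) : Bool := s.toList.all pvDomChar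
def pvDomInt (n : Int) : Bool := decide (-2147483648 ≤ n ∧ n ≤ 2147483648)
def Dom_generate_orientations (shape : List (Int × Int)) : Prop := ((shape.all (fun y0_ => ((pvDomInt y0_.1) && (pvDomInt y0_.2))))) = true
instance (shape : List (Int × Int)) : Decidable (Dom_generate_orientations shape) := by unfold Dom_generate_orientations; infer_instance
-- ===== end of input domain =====

-- B replaces A's two rotate-and-accumulate loops by one flat table of the eight
-- dihedral coordinate transforms (simpler decomposition; same exact output).

-- ===== PORT A =====
-- sorted(...) on pairs = Python's lexicographic tuple sort: PySem.List.sorted2 with keys fst, snd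
def rotate_shape (shape : List (Int × Int)) : List (Int × Int) :=
  PySem.List.sorted2 (shape.map (fun p => (p.2, -p.1))) Prod.fst Prod.snd

def py_normalize (shape : List (Int × Int)) : List (Int × Int) :=
  if shape = [] then []
  else
    -- shape ≠ [] here, so Python's min never raises; getD 0 is unreachable
    let min_r := (PySem.List.min? (shape.map (fun p => p.1)) (fun x => x)).getD 0
    let min_c := (PySem.List.min? (shape.map (fun p => p.2)) (fun x => x)).getD 0
    PySem.List.sorted2 (shape.map (fun p => (p.1 - min_r, p.2 - min_c))) Prod.fst Prod.snd

def generate_orientations (shape : List (Int × Int)) : List (List (Int × Int)) :=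
  let st1 := (List.range 4).foldl
    (fun (st : PySem.Set (List (Int × Int)) × List (Int × Int)) _ =>
      (PySem.Set.add st.1 (py_normalize st.2), rotate_shape st.2))
    (PySem.Set.empty, shape)
  let reflected := PySem.List.sorted2 (shape.map (fun p => (p.1, -p.2))) Prod.fst Prod.snd
  let st2 := (List.range 4).foldl
    (fun (st : PySem.Set (List (Int × Int)) × List (Int × Int)) _ =>
      (PySem.Set.add st.1 (py_normalize st.2), rotate_shape st.2))
    (st1.1, reflected)
  st2.1.map (fun o => o)

-- ===== PORT B =====
def pyTransforms : List ((Int × Int) → (Int × Int)) :=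
  [ fun p => (p.1, p.2),   fun p => (p.2, -p.1),  fun p => (-p.1, -p.2), fun p => (-p.2, p.1),
    fun p => (p.1, -p.2),  fun p => (-p.2, -p.1), fun p => (-p.1, p.2),  fun p => (p.2, p.1) ]

def generate_orientations_alt (shape : List (Int × Int)) : List (List (Int × Int)) :=
  (pyTransforms.foldl
    (fun (s : PySem.Set (List (Int × Int))) t => PySem.Set.add s (py_normalize (shape.map t)))
    PySem.Set.empty).map (fun o => o)

-- ===== PRECONDITION & SPEC =====
def Spec_generate_orientations (shape : List (Int × Int)) (out : List (List (Int × Int))) : Prop := out = generate_orientations_alt shape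
instance (shape : List (Int × Int)) (out : List (List (Int × Int))) : Decidable (Spec_generate_orientations shape out) := by unfold Spec_generate_orientations; infer_instance

-- ===== CLAIM (what is proved, stated in full; the proofs are below) =====
def Claim_equal_generate_orientations : Prop := ∀ (shape : List (Int × Int)), Dom_generate_orientations shape → Spec_generate_orientations shape (generate_orientations shape)

-- ===== LEMMAS AND PROOFS =====

-- sorted2's pairwise comparator is the strict order of the lexicographic product
theorem before_eq_toLex :
    (fun a b : Int × Int => (decide (a.1 < b.1) || (!decide (b.1 < a.1) && decide (a.2 < b.2))))
      = (fun a b : Int × Int => decide (toLex a < toLex b)) := by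
  funext a b
  by_cases h1 : a.1 < b.1 <;> by_cases h2 : b.1 < a.1 <;> by_cases h3 : a.2 < b.2 <;>
    simp [Prod.Lex.lt_iff, h1, h2, h3] <;> omega

theorem foldl_insertBy_pairwise {α κ : Type} [LinearOrder κ] (key : α → κ)
    (xs : List α) (acc : List α) (h : acc.Pairwise (fun a b => key a ≤ key b)) :
    (xs.foldl (fun acc x => PySem.List.insertBy (fun a b => decide (key a < key b)) x acc) acc).Pairwise
      (fun a b => key a ≤ key b) := by
  induction xs generalizing acc with
  | nil => simpa using h
  | cons x t ih => exact ih _ (PySem.List.insertBy_pairwise_le key x acc h)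

theorem sorted2_pairwise_lex (xs : List (Int × Int)) :
    (PySem.List.sorted2 xs Prod.fst Prod.snd false).Pairwise (fun a b => toLex a ≤ toLex b) := by
  show (PySem.List.sorted2 xs Prod.fst Prod.snd false).Pairwise
    (fun a b => (fun p : Int × Int => toLex p) a ≤ (fun p : Int × Int => toLex p) b)
  unfold PySem.List.sorted2
  simp only [if_neg (by decide : ¬ (false = true))]
  rw [before_eq_toLex]
  exact foldl_insertBy_pairwise (fun p : Int × Int => toLex p) xs [] (List.Pairwise.nil)

theorem sorted2_eq_of_perm {xs ys : List (Int × Int)} (h : xs.Perm ys) :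
    PySem.List.sorted2 xs Prod.fst Prod.snd false = PySem.List.sorted2 ys Prod.fst Prod.snd false := by
  refine List.Perm.eq_of_pairwise ?_ (sorted2_pairwise_lex xs) (sorted2_pairwise_lex ys) ?_
  · intro a b _ _ hab hba
    exact toLex.injective (le_antisymm hab hba)
  · exact ((PySem.List.sorted2_perm xs _ _ false).trans h).trans
      (PySem.List.sorted2_perm ys _ _ false).symm

theorem min?_id_eq_of_perm {xs ys : List Int} (h : xs.Perm ys) :
    PySem.List.min? xs (fun x => x) = PySem.List.min? ys (fun x => x) := by
  cases hx : PySem.List.min? xs (fun x => x) with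
  | none =>
      have hxe : xs = [] := (PySem.List.min?_eq_none_iff xs _).mp hx
      subst hxe
      rw [← h.nil_eq]
      exact ((PySem.List.min?_eq_none_iff [] _).mpr rfl).symm
  | some m =>
      cases hy : PySem.List.min? ys (fun x => x) with
      | none =>
          have hye : ys = [] := (PySem.List.min?_eq_none_iff ys _).mp hy
          subst hye
          rw [h.eq_nil] at hx
          simp [PySem.List.min?] at hx
      | some n =>
          have hm : m ∈ xs := PySem.List.min?_mem hx
          have hn : n ∈ ys := PySem.List.min?_mem hy
          have h1 : m ≤ n := PySem.List.min?_isMin hx n (h.mem_iff.mpr hn)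
          have h2 : n ≤ m := PySem.List.min?_isMin hy m (h.mem_iff.mp hm)
          exact congrArg some (le_antisymm h1 h2)

theorem py_normalize_eq_of_perm {s u : List (Int × Int)} (h : s.Perm u) :
    py_normalize s = py_normalize u := by
  unfold py_normalize
  by_cases hs : s = []
  · have hu : u = [] := by subst hs; exact h.symm.eq_nil
    simp [hs, hu]
  · have hu : u ≠ [] := fun hu => hs (by subst hu; exact h.eq_nil)
    rw [if_neg hs, if_neg hu,
      min?_id_eq_of_perm (h.map (fun p : Int × Int => p.1)),
      min?_id_eq_of_perm (h.map (fun p : Int × Int => p.2))]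
    exact sorted2_eq_of_perm (h.map _)

theorem rotate_perm {s u : List (Int × Int)} (h : s.Perm u) :
    (rotate_shape s).Perm (u.map (fun p => (p.2, -p.1))) :=
  (PySem.List.sorted2_perm _ _ _ false).trans (h.map _)

theorem generate_orientations_spec' (shape : List (Int × Int)) :
    generate_orientations shape = generate_orientations_alt shape := by
  -- the eight A-side cell lists are permutations of the eight transformed lists
  have h0 : shape.Perm (shape.map (fun p : Int × Int => (p.1, p.2))) := by
    have he : shape.map (fun p : Int × Int => (p.1, p.2)) = shape := List.map_id shape
    rw [he]
  have h1 : (rotate_shape shape).Perm (shape.map (fun p : Int × Int => (p.2, -p.1))) :=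
    rotate_perm (List.Perm.refl shape)
  have h2 : (rotate_shape (rotate_shape shape)).Perm (shape.map (fun p : Int × Int => (-p.1, -p.2))) := by
    have hp := rotate_perm h1
    rwa [List.map_map] at hp
  have h3 : (rotate_shape (rotate_shape (rotate_shape shape))).Perm
      (shape.map (fun p : Int × Int => (-p.2, p.1))) := by
    have hp := rotate_perm h2
    rw [List.map_map] at hp
    have he : ((fun p : Int × Int => (p.2, -p.1)) ∘ (fun p : Int × Int => (-p.1, -p.2)))
        = (fun p : Int × Int => (-p.2, p.1)) := by
      funext p; simp [Function.comp]
    rwa [he] at hp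
  have h4 : (PySem.List.sorted2 (shape.map (fun p : Int × Int => (p.1, -p.2))) Prod.fst Prod.snd).Perm
      (shape.map (fun p : Int × Int => (p.1, -p.2))) := PySem.List.sorted2_perm _ _ _ false
  have h5 : (rotate_shape (PySem.List.sorted2 (shape.map (fun p : Int × Int => (p.1, -p.2))) Prod.fst Prod.snd)).Perm
      (shape.map (fun p : Int × Int => (-p.2, -p.1))) := by
    have hp := rotate_perm h4
    rw [List.map_map] at hp
    have he : ((fun p : Int × Int => (p.2, -p.1)) ∘ (fun p : Int × Int => (p.1, -p.2)))
        = (fun p : Int × Int => (-p.2, -p.1)) := by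
      funext p; simp [Function.comp]
    rwa [he] at hp
  have h6 : (rotate_shape (rotate_shape (PySem.List.sorted2 (shape.map (fun p : Int × Int => (p.1, -p.2))) Prod.fst Prod.snd))).Perm
      (shape.map (fun p : Int × Int => (-p.1, p.2))) := by
    have hp := rotate_perm h5
    rw [List.map_map] at hp
    have he : ((fun p : Int × Int => (p.2, -p.1)) ∘ (fun p : Int × Int => (-p.2, -p.1)))
        = (fun p : Int × Int => (-p.1, p.2)) := by
      funext p; simp [Function.comp]
    rwa [he] at hp
  have h7 : (rotate_shape (rotate_shape (rotate_shape (PySem.List.sorted2 (shape.map (fun p : Int × Int => (p.1, -p.2))) Prod.fst Prod.snd)))).Perm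
      (shape.map (fun p : Int × Int => (p.2, p.1))) := by
    have hp := rotate_perm h6
    rw [List.map_map] at hp
    have he : ((fun p : Int × Int => (p.2, -p.1)) ∘ (fun p : Int × Int => (-p.1, p.2)))
        = (fun p : Int × Int => (p.2, p.1)) := by
      funext p; simp [Function.comp]
    rwa [he] at hp
  have e0 := py_normalize_eq_of_perm h0
  have e1 := py_normalize_eq_of_perm h1
  have e2 := py_normalize_eq_of_perm h2
  have e3 := py_normalize_eq_of_perm h3
  have e4 := py_normalize_eq_of_perm h4
  have e5 := py_normalize_eq_of_perm h5
  have e6 := py_normalize_eq_of_perm h6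
  have e7 := py_normalize_eq_of_perm h7
  unfold generate_orientations generate_orientations_alt pyTransforms
  have hr : List.range 4 = [0, 1, 2, 3] := rfl
  rw [hr]
  simp only [List.foldl]
  rw [e0, e1, e2, e3, e4, e5, e6, e7]

-- ===== VERDICT (by name: the statement is the Claim_ definition above) =====
theorem generate_orientations_spec : Claim_equal_generate_orientations := by
  intro shape _
  exact generate_orientations_spec' shape
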